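-- pv_equiv track=rewrite | github.com/JimmyDevvvvv/Persistence-Hunter | collector/registry_collector.py | normalise_reg_path
-- ===== SOURCE A (Python) =====
-- def normalise_reg_path(path: str) -> str:
--     r"""
--     Normalise registry paths for consistent matching.
--
--     Input formats we must handle:
--       1. Kernel paths from EvtRender raw XML (the most common case with EvtQuery):
--            \REGISTRY\MACHINE\SOFTWARE\...          -> HKLM\SOFTWARE\...
--            \REGISTRY\USER\S-1-5-21-...\Software\.. -> HKCU\Software\...
--            \REGISTRY\USER\.DEFAULT\...             -> HKU\.DEFAULT\...
--
--       2. Sysmon-abbreviated paths (from Sysmon's own rendering):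
--            HKLM\...   HKU\SID\...   HKCR\...
--
--       3. Win32 API names:
--            HKEY_LOCAL_MACHINE\...
--            HKEY_CURRENT_USER\...
--     """
--     p = path.lstrip("\\")           # strip leading backslash(es)
--     upper = p.upper()
--
--     # ── ① Kernel paths: \REGISTRY\MACHINE\... and \REGISTRY\USER\... ─────────
--     if upper.startswith("REGISTRY\\MACHINE\\"):
--         return "HKLM\\" + p[len("REGISTRY\\MACHINE\\"):]
--
--     if upper.startswith("REGISTRY\\USER\\"):
--         rest = p[len("REGISTRY\\USER\\"):]          # SID\Software\... or .DEFAULT\...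
--         # Skip the SID component (everything up to the first \)
--         parts = rest.split("\\", 1)
--         if len(parts) == 2:
--             sid, remainder = parts
--             # Well-known service SIDs are not HKCU
--             if sid.upper() in (".DEFAULT", "S-1-5-18", "S-1-5-19", "S-1-5-20"):
--                 return f"HKU\\{sid}\\{remainder}"
--             return "HKCU\\" + remainder
--         return "HKCU\\" + rest
--
--     # ── ② Sysmon-abbreviated: HKU\SID\... ────────────────────────────────────
--     if upper.startswith("HKU\\"):
--         parts = p.split("\\", 2)                    # ["HKU", "SID", "rest"]
--         if len(parts) >= 3:
--             sid = parts[1].upper()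
--             if sid in (".DEFAULT", "S-1-5-18", "S-1-5-19", "S-1-5-20"):
--                 return f"HKU\\{parts[1]}\\{parts[2]}"
--             return "HKCU\\" + parts[2]
--         return "HKCU\\" + (parts[1] if len(parts) > 1 else "")
--
--     # ── ③ Win32 long-form names ───────────────────────────────────────────────
--     if upper.startswith("HKEY_LOCAL_MACHINE\\"):
--         return "HKLM\\" + p[19:]
--     if upper.startswith("HKEY_CURRENT_USER\\"):
--         return "HKCU\\" + p[18:]
--     if upper.startswith("HKEY_USERS\\"):
--         return normalise_reg_path("HKU\\" + p[11:])
--     if upper.startswith("HKEY_CLASSES_ROOT\\"):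
--         return "HKCR\\" + p[18:]
--
--     # Already normalised (HKLM\, HKCU\, HKCR\, etc.)
--     return p
-- ===== SOURCE B (Python) =====
-- _SIDS = (".DEFAULT", "S-1-5-18", "S-1-5-19", "S-1-5-20")
--
--
-- def _user(sid, rest):
--     """sid = user-hive SID component, rest = the remaining path components."""
--     if rest:
--         tail = "\\".join(rest)
--         if sid.upper() in _SIDS:
--             return "HKU\\" + sid + "\\" + tail
--         return "HKCU\\" + tail
--     return "HKCU\\" + sid
--
--
-- def normalise_reg_path(path: str) -> str:
--     # Tokenise into components once, dispatch on the first token(s), re-join.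
--     comps = path.lstrip("\\").split("\\")
--     head = comps[0].upper()
--     if head == "REGISTRY" and len(comps) >= 3:
--         second = comps[1].upper()
--         if second == "MACHINE":
--             return "HKLM\\" + "\\".join(comps[2:])
--         if second == "USER":
--             return _user(comps[2], comps[3:])
--         return "\\".join(comps)
--     if len(comps) >= 2:
--         if head in ("HKU", "HKEY_USERS"):
--             return _user(comps[1], comps[2:])
--         if head == "HKEY_LOCAL_MACHINE":
--             return "HKLM\\" + "\\".join(comps[1:])
--         if head == "HKEY_CURRENT_USER":
--             return "HKCU\\" + "\\".join(comps[1:])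
--         if head == "HKEY_CLASSES_ROOT":
--             return "HKCR\\" + "\\".join(comps[1:])
--     return "\\".join(comps)
-- ===== Notes on version B (the rewrite author's own statement) =====
-- stated objective: alternative
-- what changed: B tokenises the path once into its backslash-separated components, dispatches on the uppercased first (and for kernel paths the second) component with explicit component-count checks, routes all three user-hive spellings through one shared SID helper working on component lists, and rebuilds every result by re-joining components; A instead matches raw string prefixes with startswith, slices by hard-coded character counts, re-splits with maxsplit inside branches and recurses for HKEY_USERS.
import Mathlib
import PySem

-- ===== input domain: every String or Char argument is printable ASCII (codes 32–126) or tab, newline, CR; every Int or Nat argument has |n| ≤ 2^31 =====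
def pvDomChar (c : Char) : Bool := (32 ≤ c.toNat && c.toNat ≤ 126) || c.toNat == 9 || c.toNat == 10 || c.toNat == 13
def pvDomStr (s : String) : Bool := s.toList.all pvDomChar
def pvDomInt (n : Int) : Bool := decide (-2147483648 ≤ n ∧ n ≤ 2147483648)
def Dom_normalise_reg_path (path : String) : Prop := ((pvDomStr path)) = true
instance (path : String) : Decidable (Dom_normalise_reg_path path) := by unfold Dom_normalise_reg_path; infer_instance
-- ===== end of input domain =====

-- B tokenises the path into backslash-separated components once, dispatches on the uppercased
-- leading component(s) with explicit length checks, and re-joins; A matches raw prefixes with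
-- hard-coded slice counts, in-branch maxsplit re-splits and a recursive HKEY_USERS rewrite. Objective: alternative.


-- ===== PORT A =====
def normalise_reg_path (path : String) : String :=
  let p : List Char := path.toList.dropWhile (· == '\\')  -- path.lstrip("\\"): exact, drops leading '\' chars
  let u : List Char := PySem.Chars.upper p                -- p.upper()
  if PySem.Chars.startswith u "REGISTRY\\MACHINE\\".toList then
    String.ofList ("HKLM\\".toList ++ PySem.List.slice p (some 17) none)
  else if PySem.Chars.startswith u "REGISTRY\\USER\\".toList then
    let rest := PySem.List.slice p (some 14) none
    let parts := (PySem.Chars.splitMax? rest ['\\'] 1).getD []   -- rest.split("\\", 1)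
    if parts.length = 2 then
      let sid := parts.getD 0 []
      let remainder := parts.getD 1 []
      if [".DEFAULT".toList, "S-1-5-18".toList, "S-1-5-19".toList, "S-1-5-20".toList].contains (PySem.Chars.upper sid) then
        String.ofList ("HKU\\".toList ++ sid ++ '\\' :: remainder)
      else
        String.ofList ("HKCU\\".toList ++ remainder)
    else
      String.ofList ("HKCU\\".toList ++ rest)
  else if PySem.Chars.startswith u "HKU\\".toList then
    let parts := (PySem.Chars.splitMax? p ['\\'] 2).getD []      -- p.split("\\", 2)
    if 3 ≤ parts.length then
      let sid := PySem.Chars.upper (parts.getD 1 [])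
      if [".DEFAULT".toList, "S-1-5-18".toList, "S-1-5-19".toList, "S-1-5-20".toList].contains sid then
        String.ofList ("HKU\\".toList ++ parts.getD 1 [] ++ '\\' :: parts.getD 2 [])
      else
        String.ofList ("HKCU\\".toList ++ parts.getD 2 [])
    else
      String.ofList ("HKCU\\".toList ++ (if 1 < parts.length then parts.getD 1 [] else []))
  else if PySem.Chars.startswith u "HKEY_LOCAL_MACHINE\\".toList then
    String.ofList ("HKLM\\".toList ++ PySem.List.slice p (some 19) none)
  else if PySem.Chars.startswith u "HKEY_CURRENT_USER\\".toList then
    String.ofList ("HKCU\\".toList ++ PySem.List.slice p (some 18) none)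
  else if h : PySem.Chars.startswith u "HKEY_USERS\\".toList then
    normalise_reg_path (String.ofList ("HKU\\".toList ++ PySem.List.slice p (some 11) none))
  else if PySem.Chars.startswith u "HKEY_CLASSES_ROOT\\".toList then
    String.ofList ("HKCR\\".toList ++ PySem.List.slice p (some 18) none)
  else
    String.ofList p
termination_by path.toList.length
decreasing_by
  have h11 : 11 ≤ (path.toList.dropWhile (· == '\\')).length := by
    have h2 := (PySem.Chars.startswith_iff _ _).mp h
    have h3 := h2.length_le
    simpa only [u, p, PySem.Chars.upper, List.length_map, String.length_toList] using h3
  have hle : (path.toList.dropWhile (· == '\\')).length ≤ path.toList.length := List.length_dropWhile_le _ _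
  have hpl : path.toList.length = path.length := by simp
  rw [PySem.List.slice_from _ (by norm_num)]
  simp
  omega

-- ===== PORT B =====
def pvServiceSids : List (List Char) := [".DEFAULT".toList, "S-1-5-18".toList, "S-1-5-19".toList, "S-1-5-20".toList]

-- _user(sid, rest): sid = user-hive SID component, rest = the remaining path components
def pvUser (sid : List Char) (rest : List (List Char)) : List Char :=
  if rest ≠ [] then                                      -- if rest:
    let tail := PySem.Chars.join ['\\'] rest             -- "\\".join(rest)
    if pvServiceSids.contains (PySem.Chars.upper sid) then
      "HKU\\".toList ++ sid ++ '\\' :: tail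
    else
      "HKCU\\".toList ++ tail
  else
    "HKCU\\".toList ++ sid

def normalise_reg_path_alt (path : String) : String :=
  let comps := PySem.Chars.splitOn (path.toList.dropWhile (· == '\\')) ['\\']   -- path.lstrip("\\").split("\\")
  let head := PySem.Chars.upper (PySem.List.pyGetD comps 0 [])                  -- comps[0].upper()
  String.ofList <|
    if head = "REGISTRY".toList ∧ 3 ≤ comps.length then
      let second := PySem.Chars.upper (PySem.List.pyGetD comps 1 [])            -- comps[1].upper()
      if second = "MACHINE".toList then
        "HKLM\\".toList ++ PySem.Chars.join ['\\'] (PySem.List.slice comps (some 2) none)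
      else if second = "USER".toList then
        pvUser (PySem.List.pyGetD comps 2 []) (PySem.List.slice comps (some 3) none)
      else
        PySem.Chars.join ['\\'] comps
    else if 2 ≤ comps.length then
      if head = "HKU".toList ∨ head = "HKEY_USERS".toList then
        pvUser (PySem.List.pyGetD comps 1 []) (PySem.List.slice comps (some 2) none)
      else if head = "HKEY_LOCAL_MACHINE".toList then
        "HKLM\\".toList ++ PySem.Chars.join ['\\'] (PySem.List.slice comps (some 1) none)
      else if head = "HKEY_CURRENT_USER".toList then
        "HKCU\\".toList ++ PySem.Chars.join ['\\'] (PySem.List.slice comps (some 1) none)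
      else if head = "HKEY_CLASSES_ROOT".toList then
        "HKCR\\".toList ++ PySem.Chars.join ['\\'] (PySem.List.slice comps (some 1) none)
      else
        PySem.Chars.join ['\\'] comps
    else
      PySem.Chars.join ['\\'] comps

-- ===== PRECONDITION & SPEC =====
def Spec_normalise_reg_path (path : String) (out : String) : Prop := out = normalise_reg_path_alt path
instance (path : String) (out : String) : Decidable (Spec_normalise_reg_path path out) := by unfold Spec_normalise_reg_path; infer_instance

-- ===== CLAIM (what is proved, stated in full; the proofs are below) =====
def Claim_equal_normalise_reg_path : Prop := ∀ (path : String), Dom_normalise_reg_path path → Spec_normalise_reg_path path (normalise_reg_path path)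

-- ===== LEMMAS AND PROOFS =====

-- splitOnMax.go basics for the single-char separator '\' (used by A's in-branch re-splits)
lemma pvGo_nil (fuel m : Nat) (cur : List Char) (acc : List (List Char)) :
    PySem.Chars.splitOnMax.go ['\\'] fuel m [] cur acc = (cur.reverse :: acc).reverse := by
  cases fuel <;> simp [PySem.Chars.splitOnMax.go]

lemma pvGo_zero (fuel : Nat) (l cur : List Char) (acc : List (List Char)) :
    PySem.Chars.splitOnMax.go ['\\'] fuel 0 l cur acc = ((cur.reverse ++ l) :: acc).reverse := by
  cases fuel with
  | zero => simp [PySem.Chars.splitOnMax.go]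
  | succ n => cases l <;> simp [PySem.Chars.splitOnMax.go]

lemma pvGo_skip (fuel m : Nat) (l cur : List Char) (acc : List (List Char)) (c : Char)
    (hc : c ≠ '\\') (hm : m ≠ 0) :
    PySem.Chars.splitOnMax.go ['\\'] (fuel+1) m (c::l) cur acc
      = PySem.Chars.splitOnMax.go ['\\'] fuel m l (c::cur) acc := by
  simp [PySem.Chars.splitOnMax.go, hm, List.isPrefixOf]
  intro h; exact absurd h.symm hc

lemma pvGo_hit (fuel m : Nat) (l cur : List Char) (acc : List (List Char)) (hm : m ≠ 0) :
    PySem.Chars.splitOnMax.go ['\\'] (fuel+1) m ('\\'::l) cur acc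
      = PySem.Chars.splitOnMax.go ['\\'] fuel (m-1) l [] (cur.reverse :: acc) := by
  simp [PySem.Chars.splitOnMax.go, hm, List.isPrefixOf]

lemma pvGo_acc (fuel : Nat) : ∀ (m : Nat) (l cur : List Char) (acc : List (List Char)),
    PySem.Chars.splitOnMax.go ['\\'] fuel m l cur acc
      = acc.reverse ++ PySem.Chars.splitOnMax.go ['\\'] fuel m l cur [] := by
  induction fuel with
  | zero => intro m l cur acc; simp [PySem.Chars.splitOnMax.go]
  | succ n ih =>
    intro m l cur acc
    cases l with
    | nil => simp [pvGo_nil]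
    | cons c t =>
      by_cases hm : m = 0
      · subst hm; simp [pvGo_zero]
      · by_cases hc : c = '\\'
        · subst hc
          rw [pvGo_hit _ _ _ _ _ hm, pvGo_hit _ _ _ _ _ hm, ih, ih (acc := [cur.reverse])]
          simp
        · rw [pvGo_skip _ _ _ _ _ _ hc hm, pvGo_skip _ _ _ _ _ _ hc hm, ih]

lemma pvGo_skip_all (a : List Char) : ∀ (f m : Nat) (l cur : List Char) (acc : List (List Char)),
    '\\' ∉ a → m ≠ 0 →
    PySem.Chars.splitOnMax.go ['\\'] (a.length + f) m (a ++ l) cur acc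
      = PySem.Chars.splitOnMax.go ['\\'] f m l (a.reverse ++ cur) acc := by
  induction a with
  | nil => intro f m l cur acc _ _; simp
  | cons c a' ih =>
    intro f m l cur acc ha hm
    have hc : c ≠ '\\' := fun h => ha (by simp [h])
    have ha' : '\\' ∉ a' := fun h => ha (by simp [h])
    have : (c :: a').length + f = (a'.length + f) + 1 := by simp; omega
    rw [this, List.cons_append, pvGo_skip _ _ _ _ _ _ hc hm, ih _ _ _ _ _ ha' hm]
    simp

lemma pvSplit1_no (s : List Char) (h : '\\' ∉ s) :
    PySem.Chars.splitOnMax s ['\\'] 1 = [s] := by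
  have h1 : PySem.Chars.splitOnMax s ['\\'] 1
      = PySem.Chars.splitOnMax.go ['\\'] (s.length + 1) 1 s [] [] := by
    simp [PySem.Chars.splitOnMax]
  rw [h1]
  have h2 : PySem.Chars.splitOnMax.go ['\\'] (s.length + 1) 1 (s ++ []) [] []
      = PySem.Chars.splitOnMax.go ['\\'] 1 1 [] (s.reverse ++ []) [] :=
    pvGo_skip_all s 1 1 [] [] [] h (by omega)
  simp only [List.append_nil] at h2
  rw [h2, pvGo_nil]
  simp

lemma pvSplit1_yes (a t : List Char) (ha : '\\' ∉ a) :
    PySem.Chars.splitOnMax (a ++ '\\' :: t) ['\\'] 1 = [a, t] := by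
  have hlen : (a ++ '\\' :: t).length + 1 = a.length + (t.length + 2) := by simp; omega
  have h1 : PySem.Chars.splitOnMax (a ++ '\\' :: t) ['\\'] 1
      = PySem.Chars.splitOnMax.go ['\\'] (a.length + (t.length + 2)) 1 (a ++ '\\' :: t) [] [] := by
    simp [PySem.Chars.splitOnMax]
    rw [← hlen]
    simp
  rw [h1, pvGo_skip_all a _ 1 _ [] [] ha (by omega)]
  have h2 : t.length + 2 = (t.length + 1) + 1 := by omega
  rw [h2, pvGo_hit _ _ _ _ _ (by omega), pvGo_zero]
  simp

lemma pvSplit2_cons (a t : List Char) (ha : '\\' ∉ a) :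
    PySem.Chars.splitOnMax (a ++ '\\' :: t) ['\\'] 2
      = a :: PySem.Chars.splitOnMax t ['\\'] 1 := by
  have hlen : (a ++ '\\' :: t).length + 1 = a.length + (t.length + 2) := by simp; omega
  have h1 : PySem.Chars.splitOnMax (a ++ '\\' :: t) ['\\'] 2
      = PySem.Chars.splitOnMax.go ['\\'] (a.length + (t.length + 2)) 2 (a ++ '\\' :: t) [] [] := by
    simp [PySem.Chars.splitOnMax]
    rw [← hlen]
    simp
  have h3 : PySem.Chars.splitOnMax t ['\\'] 1
      = PySem.Chars.splitOnMax.go ['\\'] (t.length + 1) 1 t [] [] := by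
    simp [PySem.Chars.splitOnMax]
  rw [h1, pvGo_skip_all a _ 2 _ [] [] ha (by omega)]
  have h2 : t.length + 2 = (t.length + 1) + 1 := by omega
  rw [h2, pvGo_hit _ _ _ _ _ (by omega), pvGo_acc, h3]
  simp

-- splitOn.go basics for the single-char separator '\' (used by B's one tokenising split)
lemma pvO_nil (fuel : Nat) (cur : List Char) (acc : List (List Char)) :
    PySem.Chars.splitOn.go ['\\'] fuel [] cur acc = (cur.reverse :: acc).reverse := by
  cases fuel <;> simp [PySem.Chars.splitOn.go]

lemma pvO_skip (fuel : Nat) (l cur : List Char) (acc : List (List Char)) (c : Char)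
    (hc : c ≠ '\\') :
    PySem.Chars.splitOn.go ['\\'] (fuel+1) (c::l) cur acc
      = PySem.Chars.splitOn.go ['\\'] fuel l (c::cur) acc := by
  simp [PySem.Chars.splitOn.go, List.isPrefixOf]
  intro h; exact absurd h.symm hc

lemma pvO_hit (fuel : Nat) (l cur : List Char) (acc : List (List Char)) :
    PySem.Chars.splitOn.go ['\\'] (fuel+1) ('\\'::l) cur acc
      = PySem.Chars.splitOn.go ['\\'] fuel l [] (cur.reverse :: acc) := by
  simp [PySem.Chars.splitOn.go, List.isPrefixOf]

lemma pvO_acc (fuel : Nat) : ∀ (l cur : List Char) (acc : List (List Char)),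
    PySem.Chars.splitOn.go ['\\'] fuel l cur acc
      = acc.reverse ++ PySem.Chars.splitOn.go ['\\'] fuel l cur [] := by
  induction fuel with
  | zero => intro l cur acc; simp [PySem.Chars.splitOn.go]
  | succ n ih =>
    intro l cur acc
    cases l with
    | nil => simp [pvO_nil]
    | cons c t =>
      by_cases hc : c = '\\'
      · subst hc
        rw [pvO_hit, pvO_hit, ih, ih (acc := [cur.reverse])]
        simp
      · rw [pvO_skip _ _ _ _ _ hc, pvO_skip _ _ _ _ _ hc, ih]

lemma pvO_skip_all (a : List Char) : ∀ (f : Nat) (l cur : List Char) (acc : List (List Char)),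
    '\\' ∉ a →
    PySem.Chars.splitOn.go ['\\'] (a.length + f) (a ++ l) cur acc
      = PySem.Chars.splitOn.go ['\\'] f l (a.reverse ++ cur) acc := by
  induction a with
  | nil => intro f l cur acc _; simp
  | cons c a' ih =>
    intro f l cur acc ha
    have hc : c ≠ '\\' := fun h => ha (by simp [h])
    have ha' : '\\' ∉ a' := fun h => ha (by simp [h])
    have : (c :: a').length + f = (a'.length + f) + 1 := by simp; omega
    rw [this, List.cons_append, pvO_skip _ _ _ _ _ hc, ih _ _ _ _ ha']
    simp

lemma pvSplitOn_no (s : List Char) (h : '\\' ∉ s) :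
    PySem.Chars.splitOn s ['\\'] = [s] := by
  have h1 : PySem.Chars.splitOn s ['\\']
      = PySem.Chars.splitOn.go ['\\'] (s.length + 1) s [] [] := by
    simp [PySem.Chars.splitOn]
  rw [h1]
  have h2 : PySem.Chars.splitOn.go ['\\'] (s.length + 1) (s ++ []) [] []
      = PySem.Chars.splitOn.go ['\\'] 1 [] (s.reverse ++ []) [] :=
    pvO_skip_all s 1 [] [] [] h
  simp only [List.append_nil] at h2
  rw [h2, pvO_nil]
  simp

lemma pvSplitOn_cons (a t : List Char) (ha : '\\' ∉ a) :
    PySem.Chars.splitOn (a ++ '\\' :: t) ['\\'] = a :: PySem.Chars.splitOn t ['\\'] := by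
  have hlen : (a ++ '\\' :: t).length + 1 = a.length + (t.length + 2) := by simp; omega
  have h1 : PySem.Chars.splitOn (a ++ '\\' :: t) ['\\']
      = PySem.Chars.splitOn.go ['\\'] (a.length + (t.length + 2)) (a ++ '\\' :: t) [] [] := by
    simp [PySem.Chars.splitOn]
    rw [← hlen]
    simp
  have h3 : PySem.Chars.splitOn t ['\\']
      = PySem.Chars.splitOn.go ['\\'] (t.length + 1) t [] [] := by
    simp [PySem.Chars.splitOn]
  rw [h1, pvO_skip_all a _ _ [] [] ha]
  have h2 : t.length + 2 = (t.length + 1) + 1 := by omega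
  rw [h2, pvO_hit, pvO_acc, h3]
  simp

lemma pvExistsSplit (s : List Char) (h : '\\' ∈ s) :
    ∃ a t, '\\' ∉ a ∧ s = a ++ '\\' :: t := by
  induction s with
  | nil => cases h
  | cons c s' ih =>
    by_cases hc : c = '\\'
    · exact ⟨[], s', by simp, by simp [hc]⟩
    · have hmem : '\\' ∈ s' := by
        rcases List.mem_cons.mp h with h1 | h1
        · exact absurd h1.symm hc
        · exact h1
      obtain ⟨a, t, ha, hst⟩ := ih hmem
      exact ⟨c :: a, t, by simp [ha]; exact fun h' => hc h'.symm, by simp [hst]⟩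

-- splitOn produces a nonempty list of backslash-free components whose '\'-join is the input
lemma pvSpec : ∀ (n : Nat) (s : List Char), s.length = n →
    PySem.Chars.splitOn s ['\\'] ≠ [] ∧
    PySem.Chars.join ['\\'] (PySem.Chars.splitOn s ['\\']) = s ∧
    ∀ c ∈ PySem.Chars.splitOn s ['\\'], '\\' ∉ c := by
  intro n
  induction n using Nat.strong_induction_on with
  | _ n ih =>
    intro s hs
    by_cases h : '\\' ∈ s
    · obtain ⟨a, t, ha, hst⟩ := pvExistsSplit s h
      have hlt : t.length < n := by subst hst; simp at hs; omega
      obtain ⟨hne, hj, hb⟩ := ih t.length hlt t rfl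
      subst hst
      rw [pvSplitOn_cons a t ha]
      refine ⟨by simp, ?_, ?_⟩
      · rcases hq : PySem.Chars.splitOn t ['\\'] with _ | ⟨d, ds⟩
        · exact absurd hq hne
        · rw [hq] at hj
          rw [PySem.Chars.join_cons_cons, hj]
          simp
      · intro c hc
        rcases List.mem_cons.mp hc with h1 | h1
        · subst h1; exact ha
        · exact hb c h1
    · rw [pvSplitOn_no s h]
      exact ⟨by simp, by simp [PySem.Chars.join_singleton], by intro c hc; simp at hc; subst hc; exact h⟩

lemma pvUpperChar_bs {c : Char} (h : PySem.Chars.upperChar c = '\\') : c = '\\' := by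
  by_cases hl : PySem.Chars.islower c = true
  · exfalso
    simp [PySem.Chars.upperChar, hl] at h
    simp [PySem.Chars.islower, Char.le_def] at hl
    have hlo : 97 ≤ c.toNat := by simpa using hl.1
    have hhi : c.toNat ≤ 122 := by simpa using hl.2
    have hv : (c.toNat - 32).isValidChar := Or.inl (by omega)
    have h2 := congrArg Char.toNat h
    rw [Char.toNat_ofNat] at h2
    simp [hv] at h2
    have hbs : ('\\').toNat = 92 := by decide
    omega
  · simpa [PySem.Chars.upperChar, hl] using h

lemma pvNoBS_upper {c : List Char} (h : '\\' ∉ c) : '\\' ∉ PySem.Chars.upper c := by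
  intro hmem
  simp only [PySem.Chars.upper, List.mem_map] at hmem
  obtain ⟨x, hx, hux⟩ := hmem
  exact h (by rwa [pvUpperChar_bs hux] at hx)

lemma pvUpperCons (x rest : List Char) :
    PySem.Chars.upper (x ++ '\\' :: rest) = PySem.Chars.upper x ++ '\\' :: PySem.Chars.upper rest := by
  simp [PySem.Chars.upper, (by decide : PySem.Chars.upperChar '\\' = '\\')]

-- matching a backslash at a fixed place: prefix comparison splits at the first backslash
lemma pvPrefixBS {W : List Char} : ∀ {x : List Char} {z y : List Char}, '\\' ∉ W → '\\' ∉ x →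
    ((W ++ '\\' :: z) <+: (x ++ '\\' :: y) ↔ W = x ∧ z <+: y) := by
  induction W with
  | nil =>
    intro x z y _ hx
    cases x with
    | nil => simp
    | cons c x' =>
      simp only [List.nil_append, List.cons_append, List.cons_prefix_cons]
      constructor
      · rintro ⟨h1, _⟩; exact absurd h1.symm (fun h => hx (by simp [h]))
      · rintro ⟨h1, _⟩; cases h1
  | cons w W' ih =>
    intro x z y hW hx
    cases x with
    | nil =>
      simp only [List.cons_append, List.nil_append, List.cons_prefix_cons]
      constructor
      · rintro ⟨h1, _⟩; exact absurd h1 (fun h => hW (by simp [h]))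
      · rintro ⟨h1, _⟩; cases h1
    | cons c x' =>
      have hW' : '\\' ∉ W' := fun h => hW (by simp [h])
      have hx' : '\\' ∉ x' := fun h => hx (by simp [h])
      simp only [List.cons_append, List.cons_prefix_cons, ih hW' hx', List.cons_eq_cons]
      tauto

lemma pvSW0 (u w : List Char) (hu : '\\' ∉ u) (hw : '\\' ∈ w) :
    PySem.Chars.startswith u w = false := by
  by_contra h
  rw [Bool.not_eq_false, PySem.Chars.startswith_iff] at h
  exact hu (h.mem hw)

lemma pvSW1 (x y W : List Char) (hx : '\\' ∉ x) (hW : '\\' ∉ W) :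
    PySem.Chars.startswith (x ++ '\\' :: y) (W ++ ['\\']) = true ↔ x = W := by
  rw [PySem.Chars.startswith_iff]
  have h := pvPrefixBS (x := x) (z := ([] : List Char)) (y := y) hW hx
  constructor
  · intro hp; exact ((h.mp hp).1).symm
  · intro he; exact h.mpr ⟨he.symm, by simp⟩

lemma pvSW2_false (x y W1 W2 : List Char) (hx : '\\' ∉ x) (hy : '\\' ∉ y) (hW1 : '\\' ∉ W1) :
    PySem.Chars.startswith (x ++ '\\' :: y) (W1 ++ '\\' :: (W2 ++ ['\\'])) = false := by
  by_contra h
  rw [Bool.not_eq_false, PySem.Chars.startswith_iff] at h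
  have h2 := (pvPrefixBS hW1 hx).mp h
  exact hy (h2.2.mem (by simp))

lemma pvSW2 (x y1 y2 W1 W2 : List Char) (hx : '\\' ∉ x) (hy1 : '\\' ∉ y1)
    (hW1 : '\\' ∉ W1) (hW2 : '\\' ∉ W2) :
    PySem.Chars.startswith (x ++ '\\' :: (y1 ++ '\\' :: y2)) (W1 ++ '\\' :: (W2 ++ ['\\'])) = true
      ↔ x = W1 ∧ y1 = W2 := by
  rw [PySem.Chars.startswith_iff, pvPrefixBS hW1 hx]
  have h := pvPrefixBS (x := y1) (z := ([] : List Char)) (y := y2) hW2 hy1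
  constructor
  · rintro ⟨h1, h2⟩; exact ⟨h1.symm, ((h.mp h2).1).symm⟩
  · rintro ⟨h1, h2⟩; exact ⟨h1.symm, h.mpr ⟨h2.symm, by simp⟩⟩

lemma pvUpperLen {c W : List Char} (h : PySem.Chars.upper c = W) : c.length = W.length := by
  rw [← h]; simp [PySem.Chars.upper]

lemma pvF {b : Bool} (h : ¬ b = true) : b = false := by
  cases b
  · rfl
  · exact absurd rfl h


lemma pvSW1_ne (x y W : List Char) (hx : '\\' ∉ x) (hW : '\\' ∉ W) (h : x ≠ W) :
    PySem.Chars.startswith (x ++ '\\' :: y) (W ++ ['\\']) = false := by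
  apply pvF; intro hh; exact h ((pvSW1 x y W hx hW).mp hh)

lemma pvSW1_eq (x y W : List Char) (hx : '\\' ∉ x) (hW : '\\' ∉ W) (h : x = W) :
    PySem.Chars.startswith (x ++ '\\' :: y) (W ++ ['\\']) = true := (pvSW1 x y W hx hW).mpr h

lemma pvSW2_ne (x y1 y2 W1 W2 : List Char) (hx : '\\' ∉ x) (hy1 : '\\' ∉ y1)
    (hW1 : '\\' ∉ W1) (hW2 : '\\' ∉ W2) (h : x ≠ W1) :
    PySem.Chars.startswith (x ++ '\\' :: (y1 ++ '\\' :: y2)) (W1 ++ '\\' :: (W2 ++ ['\\'])) = false := by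
  apply pvF; intro hh; exact h ((pvSW2 x y1 y2 W1 W2 hx hy1 hW1 hW2).mp hh).1

lemma pvSW2_ne2 (x y1 y2 W1 W2 : List Char) (hx : '\\' ∉ x) (hy1 : '\\' ∉ y1)
    (hW1 : '\\' ∉ W1) (hW2 : '\\' ∉ W2) (h : y1 ≠ W2) :
    PySem.Chars.startswith (x ++ '\\' :: (y1 ++ '\\' :: y2)) (W1 ++ '\\' :: (W2 ++ ['\\'])) = false := by
  apply pvF; intro hh; exact h ((pvSW2 x y1 y2 W1 W2 hx hy1 hW1 hW2).mp hh).2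

lemma pvSW2_eq (x y1 y2 W1 W2 : List Char) (hx : '\\' ∉ x) (hy1 : '\\' ∉ y1)
    (hW1 : '\\' ∉ W1) (hW2 : '\\' ∉ W2) (h1 : x = W1) (h2 : y1 = W2) :
    PySem.Chars.startswith (x ++ '\\' :: (y1 ++ '\\' :: y2)) (W1 ++ '\\' :: (W2 ++ ['\\'])) = true :=
  (pvSW2 x y1 y2 W1 W2 hx hy1 hW1 hW2).mpr ⟨h1, h2⟩

lemma pvDropPre (x rest : List Char) (n : Nat) (h : x.length + 1 = n) :
    (x ++ '\\' :: rest).drop n = rest := by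
  subst h
  rw [show x ++ '\\' :: rest = (x ++ ['\\']) ++ rest by simp,
      show x.length + 1 = (x ++ ['\\']).length by simp,
      List.drop_left]

lemma pvDropPre2 (x y rest : List Char) (n : Nat) (h : x.length + y.length + 2 = n) :
    (x ++ '\\' :: (y ++ '\\' :: rest)).drop n = rest := by
  subst h
  rw [show x ++ '\\' :: (y ++ '\\' :: rest) = (x ++ '\\' :: y ++ ['\\']) ++ rest by simp,
      show x.length + y.length + 2 = (x ++ '\\' :: y ++ ['\\']).length by simp; omega,
      List.drop_left]

-- ===== VERDICT (by name: the statement is the Claim_ definition above) =====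
set_option maxHeartbeats 2000000 in
theorem normalise_reg_path_spec : Claim_equal_normalise_reg_path := by
  intro path _
  show normalise_reg_path path = normalise_reg_path_alt path
  rw [normalise_reg_path, normalise_reg_path_alt]
  dsimp only
  generalize List.dropWhile (fun x => x == '\\') path.toList = p
  obtain ⟨hne, hjoin, hbs⟩ := pvSpec p.length p rfl
  rcases hc : PySem.Chars.splitOn p ['\\'] with _ | ⟨c0, cs⟩
  · exact absurd hc hne
  rw [hc] at hjoin hbs
  subst hjoin
  have hbs0 : '\\' ∉ c0 := hbs c0 (by simp)
  have hu0 := pvNoBS_upper hbs0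
  rcases cs with _ | ⟨c1, cs⟩
  · -- comps = [c0]
    rw [PySem.Chars.join_singleton]
    have g1f := pvSW0 _ "REGISTRY\\MACHINE\\".toList hu0 (by decide)
    have g2f := pvSW0 _ "REGISTRY\\USER\\".toList hu0 (by decide)
    have g3f := pvSW0 _ "HKU\\".toList hu0 (by decide)
    have g4f := pvSW0 _ "HKEY_LOCAL_MACHINE\\".toList hu0 (by decide)
    have g5f := pvSW0 _ "HKEY_CURRENT_USER\\".toList hu0 (by decide)
    have g6f := pvSW0 _ "HKEY_USERS\\".toList hu0 (by decide)
    have g7f := pvSW0 _ "HKEY_CLASSES_ROOT\\".toList hu0 (by decide)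
    simp only [g1f, g2f, g3f, g4f, g5f, g6f, g7f, Bool.false_eq_true, if_false,
      PySem.List.pyGetD_zero_cons, List.length_cons, List.length_nil]
    norm_num
  rcases cs with _ | ⟨c2, cs⟩
  · -- comps = [c0, c1]
    have hbs1 : '\\' ∉ c1 := hbs c1 (by simp)
    have hu1 := pvNoBS_upper hbs1
    have hp : PySem.Chars.join ['\\'] [c0, c1] = c0 ++ '\\' :: c1 := by
      rw [PySem.Chars.join_cons_cons, PySem.Chars.join_singleton]; simp
    rw [hp, pvUpperCons]
    have e1 : "REGISTRY\\MACHINE\\".toList = "REGISTRY".toList ++ '\\' :: ("MACHINE".toList ++ ['\\']) := by decide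
    have e2 : "REGISTRY\\USER\\".toList = "REGISTRY".toList ++ '\\' :: ("USER".toList ++ ['\\']) := by decide
    have e3 : "HKU\\".toList = "HKU".toList ++ ['\\'] := by decide
    have e4 : "HKEY_LOCAL_MACHINE\\".toList = "HKEY_LOCAL_MACHINE".toList ++ ['\\'] := by decide
    have e5 : "HKEY_CURRENT_USER\\".toList = "HKEY_CURRENT_USER".toList ++ ['\\'] := by decide
    have e6 : "HKEY_USERS\\".toList = "HKEY_USERS".toList ++ ['\\'] := by decide
    have e7 : "HKEY_CLASSES_ROOT\\".toList = "HKEY_CLASSES_ROOT".toList ++ ['\\'] := by decide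
    have g1f : PySem.Chars.startswith (PySem.Chars.upper c0 ++ '\\' :: PySem.Chars.upper c1) "REGISTRY\\MACHINE\\".toList = false := by
      rw [e1]; exact pvSW2_false _ _ _ _ hu0 hu1 (by decide)
    have g2f : PySem.Chars.startswith (PySem.Chars.upper c0 ++ '\\' :: PySem.Chars.upper c1) "REGISTRY\\USER\\".toList = false := by
      rw [e2]; exact pvSW2_false _ _ _ _ hu0 hu1 (by decide)
    have hg0 : PySem.List.pyGetD [c0, c1] 0 [] = c0 := by simp [pysem]
    have hg1 : PySem.List.pyGetD [c0, c1] 1 [] = c1 := by simp [pysem]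
    have hs1 : PySem.List.slice [c0, c1] (some 1) none = [c1] := by
      rw [PySem.List.slice_from _ (by norm_num)]; rfl
    have hs2 : PySem.List.slice [c0, c1] (some 2) none = ([] : List (List Char)) := by
      rw [PySem.List.slice_from _ (by norm_num)]; rfl
    rw [hg0, hg1]
    have bf1 : ¬ (PySem.Chars.upper c0 = "REGISTRY".toList ∧ 3 ≤ ([c0, c1] : List (List Char)).length) := by
      rintro ⟨-, h⟩; simp at h
    have bt2 : 2 ≤ ([c0, c1] : List (List Char)).length := by simp
    rw [if_neg (by rw [g1f]; exact Bool.false_ne_true), if_neg (by rw [g2f]; exact Bool.false_ne_true),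
        if_neg bf1, if_pos bt2]
    by_cases h3 : PySem.Chars.upper c0 = "HKU".toList
    · have g3t : PySem.Chars.startswith (PySem.Chars.upper c0 ++ '\\' :: PySem.Chars.upper c1) "HKU\\".toList = true := by
        rw [e3]; exact pvSW1_eq _ _ _ hu0 (by decide) h3
      have hparts : (PySem.Chars.splitMax? (c0 ++ '\\' :: c1) ['\\'] 2).getD [] = [c0, c1] := by
        simp only [PySem.Chars.splitMax?]
        rw [pvSplit2_cons _ _ hbs0, pvSplit1_no _ hbs1]
        rfl
      rw [if_pos g3t, hparts, if_neg (by simp), if_pos (Or.inl h3), hs2]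
      simp [pvUser]
    by_cases h6 : PySem.Chars.upper c0 = "HKEY_USERS".toList
    · have g3f : PySem.Chars.startswith (PySem.Chars.upper c0 ++ '\\' :: PySem.Chars.upper c1) "HKU\\".toList = false := by
        rw [e3]; exact pvSW1_ne _ _ _ hu0 (by decide) h3
      have g4f : PySem.Chars.startswith (PySem.Chars.upper c0 ++ '\\' :: PySem.Chars.upper c1) "HKEY_LOCAL_MACHINE\\".toList = false := by
        rw [e4]; exact pvSW1_ne _ _ _ hu0 (by decide) (by rw [h6]; decide)
      have g5f : PySem.Chars.startswith (PySem.Chars.upper c0 ++ '\\' :: PySem.Chars.upper c1) "HKEY_CURRENT_USER\\".toList = false := by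
        rw [e5]; exact pvSW1_ne _ _ _ hu0 (by decide) (by rw [h6]; decide)
      have g6t : PySem.Chars.startswith (PySem.Chars.upper c0 ++ '\\' :: PySem.Chars.upper c1) "HKEY_USERS\\".toList = true := by
        rw [e6]; exact pvSW1_eq _ _ _ hu0 (by decide) h6
      have hs11 : PySem.List.slice (c0 ++ '\\' :: c1) (some 11) none = c1 := by
        rw [PySem.List.slice_from _ (by norm_num)]
        exact pvDropPre c0 c1 11 (by rw [pvUpperLen h6]; decide)
      have harg : "HKU\\".toList ++ c1 = "HKU".toList ++ '\\' :: c1 := by rfl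
      rw [if_neg (by rw [g3f]; exact Bool.false_ne_true), if_neg (by rw [g4f]; exact Bool.false_ne_true),
          if_neg (by rw [g5f]; exact Bool.false_ne_true), dif_pos g6t, hs11, harg, normalise_reg_path]
      dsimp only
      have hdw : List.dropWhile (fun x => x == '\\') (String.ofList ("HKU".toList ++ '\\' :: c1)).toList
          = "HKU".toList ++ '\\' :: c1 := by simp
      rw [hdw, pvUpperCons, (by decide : PySem.Chars.upper "HKU".toList = "HKU".toList)]
      have gi1f : PySem.Chars.startswith ("HKU".toList ++ '\\' :: PySem.Chars.upper c1) "REGISTRY\\MACHINE\\".toList = false := by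
        rw [e1]; exact pvSW2_false _ _ _ _ (by decide) hu1 (by decide)
      have gi2f : PySem.Chars.startswith ("HKU".toList ++ '\\' :: PySem.Chars.upper c1) "REGISTRY\\USER\\".toList = false := by
        rw [e2]; exact pvSW2_false _ _ _ _ (by decide) hu1 (by decide)
      have gi3t : PySem.Chars.startswith ("HKU".toList ++ '\\' :: PySem.Chars.upper c1) "HKU\\".toList = true := by
        rw [e3]; exact pvSW1_eq _ _ _ (by decide) (by decide) rfl
      have hparts : (PySem.Chars.splitMax? ("HKU".toList ++ '\\' :: c1) ['\\'] 2).getD [] = ["HKU".toList, c1] := by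
        simp only [PySem.Chars.splitMax?]
        rw [pvSplit2_cons _ _ (by decide), pvSplit1_no _ hbs1]
        rfl
      rw [if_neg (by rw [gi1f]; exact Bool.false_ne_true), if_neg (by rw [gi2f]; exact Bool.false_ne_true),
          if_pos gi3t, hparts, if_neg (by simp), if_pos (Or.inr h6), hs2]
      simp [pvUser]
    · -- remaining: HKLM / HKCU long forms, HKCR, or no match at all
      have g3f : PySem.Chars.startswith (PySem.Chars.upper c0 ++ '\\' :: PySem.Chars.upper c1) "HKU\\".toList = false := by
        rw [e3]; exact pvSW1_ne _ _ _ hu0 (by decide) h3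
      rw [if_neg (by rw [g3f]; exact Bool.false_ne_true), if_neg (show ¬ (PySem.Chars.upper c0 = "HKU".toList ∨ PySem.Chars.upper c0 = "HKEY_USERS".toList) from fun h => h.elim h3 h6)]
      by_cases h4 : PySem.Chars.upper c0 = "HKEY_LOCAL_MACHINE".toList
      · have g4t : PySem.Chars.startswith (PySem.Chars.upper c0 ++ '\\' :: PySem.Chars.upper c1) "HKEY_LOCAL_MACHINE\\".toList = true := by
          rw [e4]; exact pvSW1_eq _ _ _ hu0 (by decide) h4
        have hs19 : PySem.List.slice (c0 ++ '\\' :: c1) (some 19) none = c1 := by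
          rw [PySem.List.slice_from _ (by norm_num)]
          exact pvDropPre c0 c1 19 (by rw [pvUpperLen h4]; decide)
        rw [if_pos g4t, hs19, if_pos h4, hs1, PySem.Chars.join_singleton]
      by_cases h5 : PySem.Chars.upper c0 = "HKEY_CURRENT_USER".toList
      · have g4f : PySem.Chars.startswith (PySem.Chars.upper c0 ++ '\\' :: PySem.Chars.upper c1) "HKEY_LOCAL_MACHINE\\".toList = false := by
          rw [e4]; exact pvSW1_ne _ _ _ hu0 (by decide) h4
        have g5t : PySem.Chars.startswith (PySem.Chars.upper c0 ++ '\\' :: PySem.Chars.upper c1) "HKEY_CURRENT_USER\\".toList = true := by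
          rw [e5]; exact pvSW1_eq _ _ _ hu0 (by decide) h5
        have hs18 : PySem.List.slice (c0 ++ '\\' :: c1) (some 18) none = c1 := by
          rw [PySem.List.slice_from _ (by norm_num)]
          exact pvDropPre c0 c1 18 (by rw [pvUpperLen h5]; decide)
        rw [if_neg (by rw [g4f]; exact Bool.false_ne_true), if_pos g5t, hs18, if_neg h4, if_pos h5,
            hs1, PySem.Chars.join_singleton]
      by_cases h7 : PySem.Chars.upper c0 = "HKEY_CLASSES_ROOT".toList
      · have g4f : PySem.Chars.startswith (PySem.Chars.upper c0 ++ '\\' :: PySem.Chars.upper c1) "HKEY_LOCAL_MACHINE\\".toList = false := by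
          rw [e4]; exact pvSW1_ne _ _ _ hu0 (by decide) h4
        have g5f : PySem.Chars.startswith (PySem.Chars.upper c0 ++ '\\' :: PySem.Chars.upper c1) "HKEY_CURRENT_USER\\".toList = false := by
          rw [e5]; exact pvSW1_ne _ _ _ hu0 (by decide) h5
        have g6f : PySem.Chars.startswith (PySem.Chars.upper c0 ++ '\\' :: PySem.Chars.upper c1) "HKEY_USERS\\".toList = false := by
          rw [e6]; exact pvSW1_ne _ _ _ hu0 (by decide) h6
        have g7t : PySem.Chars.startswith (PySem.Chars.upper c0 ++ '\\' :: PySem.Chars.upper c1) "HKEY_CLASSES_ROOT\\".toList = true := by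
          rw [e7]; exact pvSW1_eq _ _ _ hu0 (by decide) h7
        have hs18 : PySem.List.slice (c0 ++ '\\' :: c1) (some 18) none = c1 := by
          rw [PySem.List.slice_from _ (by norm_num)]
          exact pvDropPre c0 c1 18 (by rw [pvUpperLen h7]; decide)
        rw [if_neg (by rw [g4f]; exact Bool.false_ne_true), if_neg (by rw [g5f]; exact Bool.false_ne_true),
            dif_neg (by rw [g6f]; exact Bool.false_ne_true), if_pos g7t, hs18, if_neg h4, if_neg h5,
            if_pos h7, hs1, PySem.Chars.join_singleton]
      · have g4f : PySem.Chars.startswith (PySem.Chars.upper c0 ++ '\\' :: PySem.Chars.upper c1) "HKEY_LOCAL_MACHINE\\".toList = false := by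
          rw [e4]; exact pvSW1_ne _ _ _ hu0 (by decide) h4
        have g5f : PySem.Chars.startswith (PySem.Chars.upper c0 ++ '\\' :: PySem.Chars.upper c1) "HKEY_CURRENT_USER\\".toList = false := by
          rw [e5]; exact pvSW1_ne _ _ _ hu0 (by decide) h5
        have g6f : PySem.Chars.startswith (PySem.Chars.upper c0 ++ '\\' :: PySem.Chars.upper c1) "HKEY_USERS\\".toList = false := by
          rw [e6]; exact pvSW1_ne _ _ _ hu0 (by decide) h6
        have g7f : PySem.Chars.startswith (PySem.Chars.upper c0 ++ '\\' :: PySem.Chars.upper c1) "HKEY_CLASSES_ROOT\\".toList = false := by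
          rw [e7]; exact pvSW1_ne _ _ _ hu0 (by decide) h7
        rw [if_neg (by rw [g4f]; exact Bool.false_ne_true), if_neg (by rw [g5f]; exact Bool.false_ne_true),
            dif_neg (by rw [g6f]; exact Bool.false_ne_true), if_neg (by rw [g7f]; exact Bool.false_ne_true),
            if_neg h4, if_neg h5, if_neg h7]
  · -- comps = c0 :: c1 :: c2 :: cs
    have hbs1 : '\\' ∉ c1 := hbs c1 (by simp)
    have hbs2 : '\\' ∉ c2 := hbs c2 (by simp)
    have hu1 := pvNoBS_upper hbs1
    have hp : PySem.Chars.join ['\\'] (c0 :: c1 :: c2 :: cs)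
        = c0 ++ '\\' :: (c1 ++ '\\' :: PySem.Chars.join ['\\'] (c2 :: cs)) := by
      rw [PySem.Chars.join_cons_cons, PySem.Chars.join_cons_cons]; simp
    rw [hp, pvUpperCons, pvUpperCons]
    have e1 : "REGISTRY\\MACHINE\\".toList = "REGISTRY".toList ++ '\\' :: ("MACHINE".toList ++ ['\\']) := by decide
    have e2 : "REGISTRY\\USER\\".toList = "REGISTRY".toList ++ '\\' :: ("USER".toList ++ ['\\']) := by decide
    have e3 : "HKU\\".toList = "HKU".toList ++ ['\\'] := by decide
    have e4 : "HKEY_LOCAL_MACHINE\\".toList = "HKEY_LOCAL_MACHINE".toList ++ ['\\'] := by decide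
    have e5 : "HKEY_CURRENT_USER\\".toList = "HKEY_CURRENT_USER".toList ++ ['\\'] := by decide
    have e6 : "HKEY_USERS\\".toList = "HKEY_USERS".toList ++ ['\\'] := by decide
    have e7 : "HKEY_CLASSES_ROOT\\".toList = "HKEY_CLASSES_ROOT".toList ++ ['\\'] := by decide
    have hgB0 : PySem.List.pyGetD (c0 :: c1 :: c2 :: cs) 0 [] = c0 := by simp [pysem]
    have hgB1 : PySem.List.pyGetD (c0 :: c1 :: c2 :: cs) 1 [] = c1 := by simp [pysem]
    have hgB2 : PySem.List.pyGetD (c0 :: c1 :: c2 :: cs) 2 [] = c2 := by simp [pysem]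
    have hsB1 : PySem.List.slice (c0 :: c1 :: c2 :: cs) (some 1) none = c1 :: c2 :: cs := by
      rw [PySem.List.slice_from _ (by norm_num)]; rfl
    have hsB2 : PySem.List.slice (c0 :: c1 :: c2 :: cs) (some 2) none = c2 :: cs := by
      rw [PySem.List.slice_from _ (by norm_num)]; rfl
    have hsB3 : PySem.List.slice (c0 :: c1 :: c2 :: cs) (some 3) none = cs := by
      rw [PySem.List.slice_from _ (by norm_num)]; rfl
    have bt3 : 3 ≤ (c0 :: c1 :: c2 :: cs).length := by simp
    have bt2 : 2 ≤ (c0 :: c1 :: c2 :: cs).length := by simp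
    have hj1 : PySem.Chars.join ['\\'] (c1 :: c2 :: cs) = c1 ++ '\\' :: PySem.Chars.join ['\\'] (c2 :: cs) := by
      rw [PySem.Chars.join_cons_cons]; simp
    rw [hgB0, hgB1, hgB2]
    by_cases hR : PySem.Chars.upper c0 = "REGISTRY".toList
    · by_cases hM : PySem.Chars.upper c1 = "MACHINE".toList
      · have g1t : PySem.Chars.startswith (PySem.Chars.upper c0 ++ '\\' :: (PySem.Chars.upper c1 ++ '\\' :: PySem.Chars.upper (PySem.Chars.join ['\\'] (c2 :: cs)))) "REGISTRY\\MACHINE\\".toList = true := by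
          rw [e1]; exact pvSW2_eq _ _ _ _ _ hu0 hu1 (by decide) (by decide) hR hM
        have hs17 : PySem.List.slice (c0 ++ '\\' :: (c1 ++ '\\' :: PySem.Chars.join ['\\'] (c2 :: cs))) (some 17) none = PySem.Chars.join ['\\'] (c2 :: cs) := by
          rw [PySem.List.slice_from _ (by norm_num)]
          exact pvDropPre2 c0 c1 _ 17 (by rw [pvUpperLen hR, pvUpperLen hM]; decide)
        rw [if_pos g1t, hs17, if_pos (show PySem.Chars.upper c0 = "REGISTRY".toList ∧ 3 ≤ (c0 :: c1 :: c2 :: cs).length from ⟨hR, bt3⟩), if_pos hM, hsB2]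
      by_cases hU : PySem.Chars.upper c1 = "USER".toList
      · have g1f : PySem.Chars.startswith (PySem.Chars.upper c0 ++ '\\' :: (PySem.Chars.upper c1 ++ '\\' :: PySem.Chars.upper (PySem.Chars.join ['\\'] (c2 :: cs)))) "REGISTRY\\MACHINE\\".toList = false := by
          rw [e1]; exact pvSW2_ne2 _ _ _ _ _ hu0 hu1 (by decide) (by decide) hM
        have g2t : PySem.Chars.startswith (PySem.Chars.upper c0 ++ '\\' :: (PySem.Chars.upper c1 ++ '\\' :: PySem.Chars.upper (PySem.Chars.join ['\\'] (c2 :: cs)))) "REGISTRY\\USER\\".toList = true := by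
          rw [e2]; exact pvSW2_eq _ _ _ _ _ hu0 hu1 (by decide) (by decide) hR hU
        have hs14 : PySem.List.slice (c0 ++ '\\' :: (c1 ++ '\\' :: PySem.Chars.join ['\\'] (c2 :: cs))) (some 14) none = PySem.Chars.join ['\\'] (c2 :: cs) := by
          rw [PySem.List.slice_from _ (by norm_num)]
          exact pvDropPre2 c0 c1 _ 14 (by rw [pvUpperLen hR, pvUpperLen hU]; decide)
        rw [if_neg (by rw [g1f]; exact Bool.false_ne_true), if_pos g2t, hs14,
            if_pos (show PySem.Chars.upper c0 = "REGISTRY".toList ∧ 3 ≤ (c0 :: c1 :: c2 :: cs).length from ⟨hR, bt3⟩), if_neg hM, if_pos hU, hsB3]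
        rcases cs with _ | ⟨d, ds⟩
        · have hr2 : PySem.Chars.join ['\\'] [c2] = c2 := PySem.Chars.join_singleton _ _
          rw [hr2]
          have hparts : (PySem.Chars.splitMax? c2 ['\\'] 1).getD [] = [c2] := by
            simp only [PySem.Chars.splitMax?]
            rw [pvSplit1_no _ hbs2]
            rfl
          rw [hparts, if_neg (show ¬ ([c2] : List (List Char)).length = 2 by simp)]
          simp [pvUser]
        · have hr2 : PySem.Chars.join ['\\'] (c2 :: d :: ds) = c2 ++ '\\' :: PySem.Chars.join ['\\'] (d :: ds) := by
            rw [PySem.Chars.join_cons_cons]; simp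
          rw [hr2]
          have hparts : (PySem.Chars.splitMax? (c2 ++ '\\' :: PySem.Chars.join ['\\'] (d :: ds)) ['\\'] 1).getD []
              = [c2, PySem.Chars.join ['\\'] (d :: ds)] := by
            simp only [PySem.Chars.splitMax?]
            rw [pvSplit1_yes _ _ hbs2]
            rfl
          rw [hparts, if_pos (show ([c2, PySem.Chars.join ['\\'] (d :: ds)] : List (List Char)).length = 2 by simp)]
          simp [pvUser, pvServiceSids, apply_ite String.ofList]
      · have g1f : PySem.Chars.startswith (PySem.Chars.upper c0 ++ '\\' :: (PySem.Chars.upper c1 ++ '\\' :: PySem.Chars.upper (PySem.Chars.join ['\\'] (c2 :: cs)))) "REGISTRY\\MACHINE\\".toList = false := by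
          rw [e1]; exact pvSW2_ne2 _ _ _ _ _ hu0 hu1 (by decide) (by decide) hM
        have g2f : PySem.Chars.startswith (PySem.Chars.upper c0 ++ '\\' :: (PySem.Chars.upper c1 ++ '\\' :: PySem.Chars.upper (PySem.Chars.join ['\\'] (c2 :: cs)))) "REGISTRY\\USER\\".toList = false := by
          rw [e2]; exact pvSW2_ne2 _ _ _ _ _ hu0 hu1 (by decide) (by decide) hU
        have g3f : PySem.Chars.startswith (PySem.Chars.upper c0 ++ '\\' :: (PySem.Chars.upper c1 ++ '\\' :: PySem.Chars.upper (PySem.Chars.join ['\\'] (c2 :: cs)))) "HKU\\".toList = false := by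
          rw [e3]; exact pvSW1_ne _ _ _ hu0 (by decide) (by rw [hR]; decide)
        have g4f : PySem.Chars.startswith (PySem.Chars.upper c0 ++ '\\' :: (PySem.Chars.upper c1 ++ '\\' :: PySem.Chars.upper (PySem.Chars.join ['\\'] (c2 :: cs)))) "HKEY_LOCAL_MACHINE\\".toList = false := by
          rw [e4]; exact pvSW1_ne _ _ _ hu0 (by decide) (by rw [hR]; decide)
        have g5f : PySem.Chars.startswith (PySem.Chars.upper c0 ++ '\\' :: (PySem.Chars.upper c1 ++ '\\' :: PySem.Chars.upper (PySem.Chars.join ['\\'] (c2 :: cs)))) "HKEY_CURRENT_USER\\".toList = false := by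
          rw [e5]; exact pvSW1_ne _ _ _ hu0 (by decide) (by rw [hR]; decide)
        have g6f : PySem.Chars.startswith (PySem.Chars.upper c0 ++ '\\' :: (PySem.Chars.upper c1 ++ '\\' :: PySem.Chars.upper (PySem.Chars.join ['\\'] (c2 :: cs)))) "HKEY_USERS\\".toList = false := by
          rw [e6]; exact pvSW1_ne _ _ _ hu0 (by decide) (by rw [hR]; decide)
        have g7f : PySem.Chars.startswith (PySem.Chars.upper c0 ++ '\\' :: (PySem.Chars.upper c1 ++ '\\' :: PySem.Chars.upper (PySem.Chars.join ['\\'] (c2 :: cs)))) "HKEY_CLASSES_ROOT\\".toList = false := by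
          rw [e7]; exact pvSW1_ne _ _ _ hu0 (by decide) (by rw [hR]; decide)
        rw [if_neg (by rw [g1f]; exact Bool.false_ne_true), if_neg (by rw [g2f]; exact Bool.false_ne_true),
            if_neg (by rw [g3f]; exact Bool.false_ne_true), if_neg (by rw [g4f]; exact Bool.false_ne_true),
            if_neg (by rw [g5f]; exact Bool.false_ne_true), dif_neg (by rw [g6f]; exact Bool.false_ne_true),
            if_neg (by rw [g7f]; exact Bool.false_ne_true), if_pos (show PySem.Chars.upper c0 = "REGISTRY".toList ∧ 3 ≤ (c0 :: c1 :: c2 :: cs).length from ⟨hR, bt3⟩), if_neg hM, if_neg hU]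
    by_cases hHKU : PySem.Chars.upper c0 = "HKU".toList
    · have g1f : PySem.Chars.startswith (PySem.Chars.upper c0 ++ '\\' :: (PySem.Chars.upper c1 ++ '\\' :: PySem.Chars.upper (PySem.Chars.join ['\\'] (c2 :: cs)))) "REGISTRY\\MACHINE\\".toList = false := by
        rw [e1]; exact pvSW2_ne _ _ _ _ _ hu0 hu1 (by decide) (by decide) (by rw [hHKU]; decide)
      have g2f : PySem.Chars.startswith (PySem.Chars.upper c0 ++ '\\' :: (PySem.Chars.upper c1 ++ '\\' :: PySem.Chars.upper (PySem.Chars.join ['\\'] (c2 :: cs)))) "REGISTRY\\USER\\".toList = false := by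
        rw [e2]; exact pvSW2_ne _ _ _ _ _ hu0 hu1 (by decide) (by decide) (by rw [hHKU]; decide)
      have g3t : PySem.Chars.startswith (PySem.Chars.upper c0 ++ '\\' :: (PySem.Chars.upper c1 ++ '\\' :: PySem.Chars.upper (PySem.Chars.join ['\\'] (c2 :: cs)))) "HKU\\".toList = true := by
        rw [e3]; exact pvSW1_eq _ _ _ hu0 (by decide) hHKU
      have hparts : (PySem.Chars.splitMax? (c0 ++ '\\' :: (c1 ++ '\\' :: PySem.Chars.join ['\\'] (c2 :: cs))) ['\\'] 2).getD []
          = [c0, c1, PySem.Chars.join ['\\'] (c2 :: cs)] := by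
        simp only [PySem.Chars.splitMax?]
        rw [pvSplit2_cons _ _ hbs0, pvSplit1_yes _ _ hbs1]
        rfl
      have bf1 : ¬ (PySem.Chars.upper c0 = "REGISTRY".toList ∧ 3 ≤ (c0 :: c1 :: c2 :: cs).length) := by
        rintro ⟨h, -⟩; rw [hHKU] at h; exact absurd h (by decide)
      rw [if_neg (by rw [g1f]; exact Bool.false_ne_true), if_neg (by rw [g2f]; exact Bool.false_ne_true),
          if_pos g3t, hparts, if_pos (show 3 ≤ ([c0, c1, PySem.Chars.join ['\\'] (c2 :: cs)] : List (List Char)).length by simp), if_neg bf1, if_pos bt2, if_pos (Or.inl hHKU), hsB2]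
      simp [pvUser, pvServiceSids, apply_ite String.ofList]
    by_cases hHU : PySem.Chars.upper c0 = "HKEY_USERS".toList
    · have g1f : PySem.Chars.startswith (PySem.Chars.upper c0 ++ '\\' :: (PySem.Chars.upper c1 ++ '\\' :: PySem.Chars.upper (PySem.Chars.join ['\\'] (c2 :: cs)))) "REGISTRY\\MACHINE\\".toList = false := by
        rw [e1]; exact pvSW2_ne _ _ _ _ _ hu0 hu1 (by decide) (by decide) (by rw [hHU]; decide)
      have g2f : PySem.Chars.startswith (PySem.Chars.upper c0 ++ '\\' :: (PySem.Chars.upper c1 ++ '\\' :: PySem.Chars.upper (PySem.Chars.join ['\\'] (c2 :: cs)))) "REGISTRY\\USER\\".toList = false := by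
        rw [e2]; exact pvSW2_ne _ _ _ _ _ hu0 hu1 (by decide) (by decide) (by rw [hHU]; decide)
      have g3f : PySem.Chars.startswith (PySem.Chars.upper c0 ++ '\\' :: (PySem.Chars.upper c1 ++ '\\' :: PySem.Chars.upper (PySem.Chars.join ['\\'] (c2 :: cs)))) "HKU\\".toList = false := by
        rw [e3]; exact pvSW1_ne _ _ _ hu0 (by decide) hHKU
      have g4f : PySem.Chars.startswith (PySem.Chars.upper c0 ++ '\\' :: (PySem.Chars.upper c1 ++ '\\' :: PySem.Chars.upper (PySem.Chars.join ['\\'] (c2 :: cs)))) "HKEY_LOCAL_MACHINE\\".toList = false := by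
        rw [e4]; exact pvSW1_ne _ _ _ hu0 (by decide) (by rw [hHU]; decide)
      have g5f : PySem.Chars.startswith (PySem.Chars.upper c0 ++ '\\' :: (PySem.Chars.upper c1 ++ '\\' :: PySem.Chars.upper (PySem.Chars.join ['\\'] (c2 :: cs)))) "HKEY_CURRENT_USER\\".toList = false := by
        rw [e5]; exact pvSW1_ne _ _ _ hu0 (by decide) (by rw [hHU]; decide)
      have g6t : PySem.Chars.startswith (PySem.Chars.upper c0 ++ '\\' :: (PySem.Chars.upper c1 ++ '\\' :: PySem.Chars.upper (PySem.Chars.join ['\\'] (c2 :: cs)))) "HKEY_USERS\\".toList = true := by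
        rw [e6]; exact pvSW1_eq _ _ _ hu0 (by decide) hHU
      have hs11 : PySem.List.slice (c0 ++ '\\' :: (c1 ++ '\\' :: PySem.Chars.join ['\\'] (c2 :: cs))) (some 11) none
          = c1 ++ '\\' :: PySem.Chars.join ['\\'] (c2 :: cs) := by
        rw [PySem.List.slice_from _ (by norm_num)]
        exact pvDropPre c0 _ 11 (by rw [pvUpperLen hHU]; decide)
      have harg : "HKU\\".toList ++ (c1 ++ '\\' :: PySem.Chars.join ['\\'] (c2 :: cs))
          = "HKU".toList ++ '\\' :: (c1 ++ '\\' :: PySem.Chars.join ['\\'] (c2 :: cs)) := by rfl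
      rw [if_neg (by rw [g1f]; exact Bool.false_ne_true), if_neg (by rw [g2f]; exact Bool.false_ne_true),
          if_neg (by rw [g3f]; exact Bool.false_ne_true), if_neg (by rw [g4f]; exact Bool.false_ne_true),
          if_neg (by rw [g5f]; exact Bool.false_ne_true), dif_pos g6t, hs11, harg, normalise_reg_path]
      dsimp only
      have hdw : List.dropWhile (fun x => x == '\\') (String.ofList ("HKU".toList ++ '\\' :: (c1 ++ '\\' :: PySem.Chars.join ['\\'] (c2 :: cs)))).toList
          = "HKU".toList ++ '\\' :: (c1 ++ '\\' :: PySem.Chars.join ['\\'] (c2 :: cs)) := by simp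
      rw [hdw, pvUpperCons, pvUpperCons, (by decide : PySem.Chars.upper "HKU".toList = "HKU".toList)]
      have gi1f : PySem.Chars.startswith ("HKU".toList ++ '\\' :: (PySem.Chars.upper c1 ++ '\\' :: PySem.Chars.upper (PySem.Chars.join ['\\'] (c2 :: cs)))) "REGISTRY\\MACHINE\\".toList = false := by
        rw [e1]; exact pvSW2_ne _ _ _ _ _ (by decide) hu1 (by decide) (by decide) (by decide)
      have gi2f : PySem.Chars.startswith ("HKU".toList ++ '\\' :: (PySem.Chars.upper c1 ++ '\\' :: PySem.Chars.upper (PySem.Chars.join ['\\'] (c2 :: cs)))) "REGISTRY\\USER\\".toList = false := by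
        rw [e2]; exact pvSW2_ne _ _ _ _ _ (by decide) hu1 (by decide) (by decide) (by decide)
      have gi3t : PySem.Chars.startswith ("HKU".toList ++ '\\' :: (PySem.Chars.upper c1 ++ '\\' :: PySem.Chars.upper (PySem.Chars.join ['\\'] (c2 :: cs)))) "HKU\\".toList = true := by
        rw [e3]; exact pvSW1_eq _ _ _ (by decide) (by decide) rfl
      have hparts : (PySem.Chars.splitMax? ("HKU".toList ++ '\\' :: (c1 ++ '\\' :: PySem.Chars.join ['\\'] (c2 :: cs))) ['\\'] 2).getD []
          = ["HKU".toList, c1, PySem.Chars.join ['\\'] (c2 :: cs)] := by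
        simp only [PySem.Chars.splitMax?]
        rw [pvSplit2_cons _ _ (by decide), pvSplit1_yes _ _ hbs1]
        rfl
      have bf1 : ¬ (PySem.Chars.upper c0 = "REGISTRY".toList ∧ 3 ≤ (c0 :: c1 :: c2 :: cs).length) := by
        rintro ⟨h, -⟩; rw [hHU] at h; exact absurd h (by decide)
      rw [if_neg (by rw [gi1f]; exact Bool.false_ne_true), if_neg (by rw [gi2f]; exact Bool.false_ne_true),
          if_pos gi3t, hparts, if_pos (show 3 ≤ (["HKU".toList, c1, PySem.Chars.join ['\\'] (c2 :: cs)] : List (List Char)).length by simp), if_neg bf1, if_pos bt2, if_pos (Or.inr hHU), hsB2]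
      simp [pvUser, pvServiceSids, apply_ite String.ofList]
    · -- remaining: HKLM / HKCU long forms, HKCR, or no match at all
      have g1f : PySem.Chars.startswith (PySem.Chars.upper c0 ++ '\\' :: (PySem.Chars.upper c1 ++ '\\' :: PySem.Chars.upper (PySem.Chars.join ['\\'] (c2 :: cs)))) "REGISTRY\\MACHINE\\".toList = false := by
        rw [e1]; exact pvSW2_ne _ _ _ _ _ hu0 hu1 (by decide) (by decide) hR
      have g2f : PySem.Chars.startswith (PySem.Chars.upper c0 ++ '\\' :: (PySem.Chars.upper c1 ++ '\\' :: PySem.Chars.upper (PySem.Chars.join ['\\'] (c2 :: cs)))) "REGISTRY\\USER\\".toList = false := by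
        rw [e2]; exact pvSW2_ne _ _ _ _ _ hu0 hu1 (by decide) (by decide) hR
      have g3f : PySem.Chars.startswith (PySem.Chars.upper c0 ++ '\\' :: (PySem.Chars.upper c1 ++ '\\' :: PySem.Chars.upper (PySem.Chars.join ['\\'] (c2 :: cs)))) "HKU\\".toList = false := by
        rw [e3]; exact pvSW1_ne _ _ _ hu0 (by decide) hHKU
      have bf1 : ¬ (PySem.Chars.upper c0 = "REGISTRY".toList ∧ 3 ≤ (c0 :: c1 :: c2 :: cs).length) := by
        rintro ⟨h, -⟩; exact hR h
      rw [if_neg (by rw [g1f]; exact Bool.false_ne_true), if_neg (by rw [g2f]; exact Bool.false_ne_true),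
          if_neg (by rw [g3f]; exact Bool.false_ne_true), if_neg bf1, if_pos bt2,
          if_neg (show ¬ (PySem.Chars.upper c0 = "HKU".toList ∨ PySem.Chars.upper c0 = "HKEY_USERS".toList) from fun h => h.elim hHKU hHU)]
      by_cases hLM : PySem.Chars.upper c0 = "HKEY_LOCAL_MACHINE".toList
      · have g4t : PySem.Chars.startswith (PySem.Chars.upper c0 ++ '\\' :: (PySem.Chars.upper c1 ++ '\\' :: PySem.Chars.upper (PySem.Chars.join ['\\'] (c2 :: cs)))) "HKEY_LOCAL_MACHINE\\".toList = true := by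
          rw [e4]; exact pvSW1_eq _ _ _ hu0 (by decide) hLM
        have hs19 : PySem.List.slice (c0 ++ '\\' :: (c1 ++ '\\' :: PySem.Chars.join ['\\'] (c2 :: cs))) (some 19) none
            = c1 ++ '\\' :: PySem.Chars.join ['\\'] (c2 :: cs) := by
          rw [PySem.List.slice_from _ (by norm_num)]
          exact pvDropPre c0 _ 19 (by rw [pvUpperLen hLM]; decide)
        rw [if_pos g4t, hs19, if_pos hLM, hsB1, hj1]
      by_cases hCU : PySem.Chars.upper c0 = "HKEY_CURRENT_USER".toList
      · have g4f : PySem.Chars.startswith (PySem.Chars.upper c0 ++ '\\' :: (PySem.Chars.upper c1 ++ '\\' :: PySem.Chars.upper (PySem.Chars.join ['\\'] (c2 :: cs)))) "HKEY_LOCAL_MACHINE\\".toList = false := by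
          rw [e4]; exact pvSW1_ne _ _ _ hu0 (by decide) hLM
        have g5t : PySem.Chars.startswith (PySem.Chars.upper c0 ++ '\\' :: (PySem.Chars.upper c1 ++ '\\' :: PySem.Chars.upper (PySem.Chars.join ['\\'] (c2 :: cs)))) "HKEY_CURRENT_USER\\".toList = true := by
          rw [e5]; exact pvSW1_eq _ _ _ hu0 (by decide) hCU
        have hs18 : PySem.List.slice (c0 ++ '\\' :: (c1 ++ '\\' :: PySem.Chars.join ['\\'] (c2 :: cs))) (some 18) none
            = c1 ++ '\\' :: PySem.Chars.join ['\\'] (c2 :: cs) := by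
          rw [PySem.List.slice_from _ (by norm_num)]
          exact pvDropPre c0 _ 18 (by rw [pvUpperLen hCU]; decide)
        rw [if_neg (by rw [g4f]; exact Bool.false_ne_true), if_pos g5t, hs18, if_neg hLM, if_pos hCU,
            hsB1, hj1]
      by_cases hCR : PySem.Chars.upper c0 = "HKEY_CLASSES_ROOT".toList
      · have g4f : PySem.Chars.startswith (PySem.Chars.upper c0 ++ '\\' :: (PySem.Chars.upper c1 ++ '\\' :: PySem.Chars.upper (PySem.Chars.join ['\\'] (c2 :: cs)))) "HKEY_LOCAL_MACHINE\\".toList = false := by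
          rw [e4]; exact pvSW1_ne _ _ _ hu0 (by decide) hLM
        have g5f : PySem.Chars.startswith (PySem.Chars.upper c0 ++ '\\' :: (PySem.Chars.upper c1 ++ '\\' :: PySem.Chars.upper (PySem.Chars.join ['\\'] (c2 :: cs)))) "HKEY_CURRENT_USER\\".toList = false := by
          rw [e5]; exact pvSW1_ne _ _ _ hu0 (by decide) hCU
        have g6f : PySem.Chars.startswith (PySem.Chars.upper c0 ++ '\\' :: (PySem.Chars.upper c1 ++ '\\' :: PySem.Chars.upper (PySem.Chars.join ['\\'] (c2 :: cs)))) "HKEY_USERS\\".toList = false := by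
          rw [e6]; exact pvSW1_ne _ _ _ hu0 (by decide) hHU
        have g7t : PySem.Chars.startswith (PySem.Chars.upper c0 ++ '\\' :: (PySem.Chars.upper c1 ++ '\\' :: PySem.Chars.upper (PySem.Chars.join ['\\'] (c2 :: cs)))) "HKEY_CLASSES_ROOT\\".toList = true := by
          rw [e7]; exact pvSW1_eq _ _ _ hu0 (by decide) hCR
        have hs18 : PySem.List.slice (c0 ++ '\\' :: (c1 ++ '\\' :: PySem.Chars.join ['\\'] (c2 :: cs))) (some 18) none
            = c1 ++ '\\' :: PySem.Chars.join ['\\'] (c2 :: cs) := by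
          rw [PySem.List.slice_from _ (by norm_num)]
          exact pvDropPre c0 _ 18 (by rw [pvUpperLen hCR]; decide)
        rw [if_neg (by rw [g4f]; exact Bool.false_ne_true), if_neg (by rw [g5f]; exact Bool.false_ne_true),
            dif_neg (by rw [g6f]; exact Bool.false_ne_true), if_pos g7t, hs18, if_neg hLM, if_neg hCU,
            if_pos hCR, hsB1, hj1]
      · have g4f : PySem.Chars.startswith (PySem.Chars.upper c0 ++ '\\' :: (PySem.Chars.upper c1 ++ '\\' :: PySem.Chars.upper (PySem.Chars.join ['\\'] (c2 :: cs)))) "HKEY_LOCAL_MACHINE\\".toList = false := by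
          rw [e4]; exact pvSW1_ne _ _ _ hu0 (by decide) hLM
        have g5f : PySem.Chars.startswith (PySem.Chars.upper c0 ++ '\\' :: (PySem.Chars.upper c1 ++ '\\' :: PySem.Chars.upper (PySem.Chars.join ['\\'] (c2 :: cs)))) "HKEY_CURRENT_USER\\".toList = false := by
          rw [e5]; exact pvSW1_ne _ _ _ hu0 (by decide) hCU
        have g6f : PySem.Chars.startswith (PySem.Chars.upper c0 ++ '\\' :: (PySem.Chars.upper c1 ++ '\\' :: PySem.Chars.upper (PySem.Chars.join ['\\'] (c2 :: cs)))) "HKEY_USERS\\".toList = false := by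
          rw [e6]; exact pvSW1_ne _ _ _ hu0 (by decide) hHU
        have g7f : PySem.Chars.startswith (PySem.Chars.upper c0 ++ '\\' :: (PySem.Chars.upper c1 ++ '\\' :: PySem.Chars.upper (PySem.Chars.join ['\\'] (c2 :: cs)))) "HKEY_CLASSES_ROOT\\".toList = false := by
          rw [e7]; exact pvSW1_ne _ _ _ hu0 (by decide) hCR
        rw [if_neg (by rw [g4f]; exact Bool.false_ne_true), if_neg (by rw [g5f]; exact Bool.false_ne_true),
            dif_neg (by rw [g6f]; exact Bool.false_ne_true), if_neg (by rw [g7f]; exact Bool.false_ne_true),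
            if_neg hLM, if_neg hCU, if_neg hCR]
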